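-- pv_equiv track=rewrite | github.com/sid-in-the-loop/11697-hw6-ssmurali | src/data/processor.py | get_category
-- ===== SOURCE A (Python) =====
-- def get_category(title, content, url):
--     """Determine document category based on content analysis."""
--     text = f"{title} {content} {url}".lower()
--
--     # Baggage keywords
--     baggage_keywords = ['baggage', 'luggage', 'carry-on', 'checked', 'allowance', 'weight', 'size', 'dimensions', 'restrictions', 'prohibited', 'items']
--     baggage_score = sum(1 for word in baggage_keywords if word in text)
--
--     # Fees keywords
--     fees_keywords = ['fee', 'charge', 'cost', 'price', 'payment', 'refund', 'penalty', 'extra', 'additional', 'overweight', 'oversized']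
--     fees_score = sum(1 for word in fees_keywords if word in text)
--
--     # Ticket changes keywords
--     changes_keywords = ['change', 'modify', 'cancel', 'refund', 'exchange', 'rebook', 'reschedule', 'no-show', 'penalty', 'deadline']
--     changes_score = sum(1 for word in changes_keywords if word in text)
--
--     # General policy keywords
--     general_keywords = ['policy', 'terms', 'conditions', 'rules', 'regulations', 'contract', 'carriage', 'passenger', 'rights', 'responsibilities']
--     general_score = sum(1 for word in general_keywords if word in text)
--
--     # Return category with highest score
--     scores = {
--         "Baggage Policies": baggage_score,
--         "Fees and Charges": fees_score,
--         "Ticket Changes and Cancellations": changes_score,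
--         "General Policies": general_score
--     }
--
--     # Return the category with the highest score, default to General if tied
--     best_category = max(scores, key=scores.get)
--     return best_category if scores[best_category] > 0 else "General Policies"
-- ===== SOURCE B (Python) =====
-- def get_category(title, content, url):
--     """Inverted keyword->categories index: one substring pass over distinct keywords."""
--     text = f"{title} {content} {url}".lower()
--
--     categories = [
--         ("Baggage Policies", ['baggage', 'luggage', 'carry-on', 'checked', 'allowance', 'weight', 'size', 'dimensions', 'restrictions', 'prohibited', 'items']),
--         ("Fees and Charges", ['fee', 'charge', 'cost', 'price', 'payment', 'refund', 'penalty', 'extra', 'additional', 'overweight', 'oversized']),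
--         ("Ticket Changes and Cancellations", ['change', 'modify', 'cancel', 'refund', 'exchange', 'rebook', 'reschedule', 'no-show', 'penalty', 'deadline']),
--         ("General Policies", ['policy', 'terms', 'conditions', 'rules', 'regulations', 'contract', 'carriage', 'passenger', 'rights', 'responsibilities']),
--     ]
--
--     index = {}
--     for name, kws in categories:
--         for k in kws:
--             index.setdefault(k, []).append(name)
--
--     hits = [k for k in index if k in text]
--
--     scores = {name: sum(1 for k in hits if name in index[k]) for name, _ in categories}
--
--     best, best_score = None, 0
--     for name, sc in scores.items():
--         if sc > best_score:
--             best, best_score = name, sc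
--     return best if best is not None else "General Policies"
-- ===== Notes on version B (the rewrite author's own statement) =====
-- stated objective: alternative
-- what changed: B builds an inverted keyword->categories index once, runs a single substring pass over the 40 distinct keywords to collect hits, and derives each category's score from the hit list, instead of A's four independent keyword-list scans over the text.
import Mathlib
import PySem

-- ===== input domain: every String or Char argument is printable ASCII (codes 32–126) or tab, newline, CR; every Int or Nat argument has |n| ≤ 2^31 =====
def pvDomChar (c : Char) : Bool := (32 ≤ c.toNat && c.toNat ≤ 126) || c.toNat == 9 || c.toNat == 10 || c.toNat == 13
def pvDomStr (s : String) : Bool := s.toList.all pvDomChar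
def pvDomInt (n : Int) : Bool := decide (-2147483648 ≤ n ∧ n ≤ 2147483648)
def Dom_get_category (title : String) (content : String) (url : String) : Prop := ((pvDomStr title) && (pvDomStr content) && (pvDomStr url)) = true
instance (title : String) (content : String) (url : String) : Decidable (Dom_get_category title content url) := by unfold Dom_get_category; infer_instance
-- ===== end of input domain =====

-- B replaces A's four per-category keyword scans with one inverted keyword->categories index and a
-- single substring pass over the distinct keywords (objective: alternative decomposition).


-- ===== PORT A =====
-- A-side helpers: the four keyword lists and the "sum(1 for word in kws if word in text)" generator
def pvBaggageKws : List String := ["baggage", "luggage", "carry-on", "checked", "allowance", "weight", "size", "dimensions", "restrictions", "prohibited", "items"]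
def pvFeesKws : List String := ["fee", "charge", "cost", "price", "payment", "refund", "penalty", "extra", "additional", "overweight", "oversized"]
def pvChangesKws : List String := ["change", "modify", "cancel", "refund", "exchange", "rebook", "reschedule", "no-show", "penalty", "deadline"]
def pvGeneralKws : List String := ["policy", "terms", "conditions", "rules", "regulations", "contract", "carriage", "passenger", "rights", "responsibilities"]
def pvSum1 (text : String) (kws : List String) : Int :=
  (kws.map (fun w => if PySem.Str.isIn w text then (1 : Int) else 0)).sum

-- "best_category = max(scores, key=scores.get); return best_category if scores[best_category] > 0
-- else \'General Policies\'": every key iterated is a key of scores, so scores.get k is its value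
-- (never None) — ported as getD; likewise scores[best] (best is a key, no KeyError).
def pvBestA (scores : PySem.Dict String Int) : String :=
  match PySem.List.max? scores.keys (fun k => scores.getD k 0) with
  | some best => if scores.getD best 0 > 0 then best else "General Policies"
  | none => "General Policies"  -- unreachable: scores always has four keys

def get_category (title : String) (content : String) (url : String) : String :=
  let text := PySem.Str.lower (title ++ " " ++ content ++ " " ++ url)
  let scores : PySem.Dict String Int := PySem.Dict.ofList
    [("Baggage Policies", pvSum1 text pvBaggageKws),
     ("Fees and Charges", pvSum1 text pvFeesKws),
     ("Ticket Changes and Cancellations", pvSum1 text pvChangesKws),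
     ("General Policies", pvSum1 text pvGeneralKws)]
  pvBestA scores

-- ===== PORT B =====
-- B-side helpers: the category table and the inverted index (closed terms, built once)
def pvCats : List (String × List String) :=
  [("Baggage Policies", ["baggage", "luggage", "carry-on", "checked", "allowance", "weight", "size", "dimensions", "restrictions", "prohibited", "items"]),
   ("Fees and Charges", ["fee", "charge", "cost", "price", "payment", "refund", "penalty", "extra", "additional", "overweight", "oversized"]),
   ("Ticket Changes and Cancellations", ["change", "modify", "cancel", "refund", "exchange", "rebook", "reschedule", "no-show", "penalty", "deadline"]),
   ("General Policies", ["policy", "terms", "conditions", "rules", "regulations", "contract", "carriage", "passenger", "rights", "responsibilities"])]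

-- index.setdefault(k, []).append(name)  ==  index[k] = index.get(k, []) + [name]  ==  Dict.modify
def pvIndex : PySem.Dict String (List String) :=
  pvCats.foldl (fun d p => p.2.foldl (fun d k => d.modify k [] (fun l => l ++ [p.1])) d) PySem.Dict.empty

-- Source B's final lines: a running-max loop over scores.items(), None meaning "no positive score yet"
def pvBestB (scores : PySem.Dict String Int) : String :=
  let r := scores.items.foldl
    (fun (acc : Option String × Int) p => if p.2 > acc.2 then (some p.1, p.2) else acc)
    (none, 0)
  match r.1 with
  | some best => best
  | none => "General Policies"

def get_category_alt (title : String) (content : String) (url : String) : String :=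
  let text := PySem.Str.lower (title ++ " " ++ content ++ " " ++ url)
  let hits := pvIndex.keys.filter (fun k => PySem.Str.isIn k text)
  -- name in index[k]: every k in hits is a key of index, so index[k] never raises — ported as getD
  let scores : PySem.Dict String Int := PySem.Dict.ofList
    (pvCats.map (fun p => (p.1, (hits.map (fun k => if p.1 ∈ pvIndex.getD k [] then (1 : Int) else 0)).sum)))
  pvBestB scores

-- ===== PRECONDITION & SPEC =====
def Spec_get_category (title : String) (content : String) (url : String) (out : String) : Prop := out = get_category_alt title content url
instance (title : String) (content : String) (url : String) (out : String) : Decidable (Spec_get_category title content url out) := by unfold Spec_get_category; infer_instance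

-- ===== CLAIM (what is proved, stated in full; the proofs are below) =====
def Claim_equal_get_category : Prop := ∀ (title : String) (content : String) (url : String), Dom_get_category title content url → Spec_get_category title content url (get_category title content url)

-- ===== LEMMAS AND PROOFS =====

-- summing over a filtered list = summing an ite over the whole list
theorem sum_map_filter_eq (l : List String) (p : String → Bool) (f : String → Int) :
    ((l.filter p).map f).sum = (l.map (fun x => if p x then f x else 0)).sum := by
  induction l with
  | nil => rfl
  | cons a t ih => by_cases h : p a <;> simp [h, ih]

-- the inverted index, evaluated to its literal association list
def pvIndexLit : List (String × List String) :=
  [("baggage", ["Baggage Policies"]),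
   ("luggage", ["Baggage Policies"]),
   ("carry-on", ["Baggage Policies"]),
   ("checked", ["Baggage Policies"]),
   ("allowance", ["Baggage Policies"]),
   ("weight", ["Baggage Policies"]),
   ("size", ["Baggage Policies"]),
   ("dimensions", ["Baggage Policies"]),
   ("restrictions", ["Baggage Policies"]),
   ("prohibited", ["Baggage Policies"]),
   ("items", ["Baggage Policies"]),
   ("fee", ["Fees and Charges"]),
   ("charge", ["Fees and Charges"]),
   ("cost", ["Fees and Charges"]),
   ("price", ["Fees and Charges"]),
   ("payment", ["Fees and Charges"]),
   ("refund", ["Fees and Charges", "Ticket Changes and Cancellations"]),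
   ("penalty", ["Fees and Charges", "Ticket Changes and Cancellations"]),
   ("extra", ["Fees and Charges"]),
   ("additional", ["Fees and Charges"]),
   ("overweight", ["Fees and Charges"]),
   ("oversized", ["Fees and Charges"]),
   ("change", ["Ticket Changes and Cancellations"]),
   ("modify", ["Ticket Changes and Cancellations"]),
   ("cancel", ["Ticket Changes and Cancellations"]),
   ("exchange", ["Ticket Changes and Cancellations"]),
   ("rebook", ["Ticket Changes and Cancellations"]),
   ("reschedule", ["Ticket Changes and Cancellations"]),
   ("no-show", ["Ticket Changes and Cancellations"]),
   ("deadline", ["Ticket Changes and Cancellations"]),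
   ("policy", ["General Policies"]),
   ("terms", ["General Policies"]),
   ("conditions", ["General Policies"]),
   ("rules", ["General Policies"]),
   ("regulations", ["General Policies"]),
   ("contract", ["General Policies"]),
   ("carriage", ["General Policies"]),
   ("passenger", ["General Policies"]),
   ("rights", ["General Policies"]),
   ("responsibilities", ["General Policies"])]

set_option maxRecDepth 10000 in
theorem pvIndex_eq : pvIndex = PySem.Dict.mk pvIndexLit := by rfl

theorem score_cat (text : String) (name : String) (kws : List String)
    (h : ((PySem.Dict.mk pvIndexLit).keys.map
        (fun x => if PySem.Str.isIn x text then (if name ∈ (PySem.Dict.mk pvIndexLit).getD x [] then (1 : Int) else 0) else 0)).sum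
      = pvSum1 text kws) :
    ((pvIndex.keys.filter (fun k => PySem.Str.isIn k text)).map
      (fun k => if name ∈ pvIndex.getD k [] then (1 : Int) else 0)).sum = pvSum1 text kws := by
  rw [sum_map_filter_eq, pvIndex_eq]
  exact h

set_option maxRecDepth 10000 in
set_option maxHeartbeats 1000000 in
theorem score_baggage (text : String) :
    ((pvIndex.keys.filter (fun k => PySem.Str.isIn k text)).map
      (fun k => if "Baggage Policies" ∈ pvIndex.getD k [] then (1 : Int) else 0)).sum = pvSum1 text pvBaggageKws := by
  apply score_cat
  simp [pvIndexLit, pvSum1, pvBaggageKws, PySem.Dict.keys_mk, PySem.Dict.getD_eq_get?_getD, PySem.Dict.get?_mk_cons]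
  try ring_nf

set_option maxRecDepth 10000 in
set_option maxHeartbeats 1000000 in
theorem score_fees (text : String) :
    ((pvIndex.keys.filter (fun k => PySem.Str.isIn k text)).map
      (fun k => if "Fees and Charges" ∈ pvIndex.getD k [] then (1 : Int) else 0)).sum = pvSum1 text pvFeesKws := by
  apply score_cat
  simp [pvIndexLit, pvSum1, pvFeesKws, PySem.Dict.keys_mk, PySem.Dict.getD_eq_get?_getD, PySem.Dict.get?_mk_cons]
  try ring_nf

set_option maxRecDepth 10000 in
set_option maxHeartbeats 1000000 in
theorem score_changes (text : String) :
    ((pvIndex.keys.filter (fun k => PySem.Str.isIn k text)).map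
      (fun k => if "Ticket Changes and Cancellations" ∈ pvIndex.getD k [] then (1 : Int) else 0)).sum = pvSum1 text pvChangesKws := by
  apply score_cat
  simp [pvIndexLit, pvSum1, pvChangesKws, PySem.Dict.keys_mk, PySem.Dict.getD_eq_get?_getD, PySem.Dict.get?_mk_cons]
  try ring_nf

set_option maxRecDepth 10000 in
set_option maxHeartbeats 1000000 in
theorem score_general (text : String) :
    ((pvIndex.keys.filter (fun k => PySem.Str.isIn k text)).map
      (fun k => if "General Policies" ∈ pvIndex.getD k [] then (1 : Int) else 0)).sum = pvSum1 text pvGeneralKws := by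
  apply score_cat
  simp [pvIndexLit, pvSum1, pvGeneralKws, PySem.Dict.keys_mk, PySem.Dict.getD_eq_get?_getD, PySem.Dict.get?_mk_cons]
  try ring_nf

-- B's score dict equals A's score dict
set_option maxRecDepth 10000 in
set_option maxHeartbeats 2000000 in
theorem scores_eq (text : String) :
    PySem.Dict.ofList
      (pvCats.map (fun p => (p.1, ((pvIndex.keys.filter (fun k => PySem.Str.isIn k text)).map
        (fun k => if p.1 ∈ pvIndex.getD k [] then (1 : Int) else 0)).sum)))
    = PySem.Dict.ofList
      [("Baggage Policies", pvSum1 text pvBaggageKws),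
       ("Fees and Charges", pvSum1 text pvFeesKws),
       ("Ticket Changes and Cancellations", pvSum1 text pvChangesKws),
       ("General Policies", pvSum1 text pvGeneralKws)] := by
  simp only [pvCats, List.map_cons, List.map_nil]
  rw [score_baggage text, score_fees text, score_changes text, score_general text]

-- every score A computes is nonnegative
theorem pvSum1_nonneg (text : String) (kws : List String) : 0 ≤ pvSum1 text kws := by
  induction kws with
  | nil => simp [pvSum1]
  | cons w t ih =>
    simp only [pvSum1, List.map_cons, List.sum_cons] at *
    split_ifs <;> omega

-- on four nonnegative scores, A's max-then-threshold equals B's running-max loop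
set_option maxHeartbeats 4000000 in
theorem best_eq (a b c d : Int) (ha : 0 ≤ a) (hb : 0 ≤ b) (hc : 0 ≤ c) (_hd : 0 ≤ d) :
    pvBestA (PySem.Dict.ofList
      [("Baggage Policies", a), ("Fees and Charges", b),
       ("Ticket Changes and Cancellations", c), ("General Policies", d)])
    = pvBestB (PySem.Dict.ofList
      [("Baggage Policies", a), ("Fees and Charges", b),
       ("Ticket Changes and Cancellations", c), ("General Policies", d)]) := by
  have h : PySem.Dict.ofList
      [("Baggage Policies", a), ("Fees and Charges", b),
       ("Ticket Changes and Cancellations", c), ("General Policies", d)]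
      = PySem.Dict.mk
      [("Baggage Policies", a), ("Fees and Charges", b),
       ("Ticket Changes and Cancellations", c), ("General Policies", d)] := rfl
  rw [h]
  simp [pvBestA, pvBestB, PySem.List.max?, PySem.Dict.keys,
    PySem.Dict.getD_eq_get?_getD, PySem.Dict.get?_mk_cons, List.foldl]
  split_ifs <;> simp_all <;> try omega
  all_goals (split_ifs <;> simp_all <;> try omega)
  all_goals (split_ifs <;> simp_all <;> try omega)

set_option maxRecDepth 10000 in
set_option maxHeartbeats 2000000 in
theorem get_category_eq (title content url : String) :
    get_category title content url = get_category_alt title content url := by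
  simp only [get_category, get_category_alt]
  rw [scores_eq]
  exact best_eq _ _ _ _ (pvSum1_nonneg _ _) (pvSum1_nonneg _ _) (pvSum1_nonneg _ _) (pvSum1_nonneg _ _)

-- ===== VERDICT (by name: the statement is the Claim_ definition above) =====
theorem get_category_spec : Claim_equal_get_category := by
  intro title content url _
  exact get_category_eq title content url
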